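-- pv_equiv track=rewrite | github.com/jeanchristopheCarrot/Plc_keyence | app.py | decode_active_bits
-- ===== SOURCE A (Python) =====
-- from typing import Any, Dict, List, Optional, Tuple
--
-- def decode_active_bits(words: List[int]) -> List[int]:
--     active = []
--     for word_index, word in enumerate(words):
--         value = int(word) & 0xFFFF
--         for bit in range(16):
--             if value & (1 << bit):
--                 active.append(word_index * 16 + bit)
--     return active
-- ===== SOURCE B (Python) =====
-- # Table-driven decode: precomputed set-bit lists per 4-bit nibble, 4 table
-- # lookups per word instead of testing 16 bit positions.
-- _NIBBLE_BITS = [[b for b in range(4) if v >> b & 1] for v in range(16)]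
--
-- def decode_active_bits(words):
--     active = []
--     for word_index, word in enumerate(words):
--         value = int(word) & 0xFFFF
--         for n in range(4):
--             offset = word_index * 16 + 4 * n
--             for b in _NIBBLE_BITS[value >> 4 * n & 0xF]:
--                 active.append(offset + b)
--     return active
-- ===== Notes on version B (the rewrite author's own statement) =====
-- stated objective: alternative
-- what changed: Replaced the per-bit scan of 16 mask tests with a table-driven decode: a precomputed lookup table mapping each 4-bit nibble value to its ascending list of set-bit indices, so each word is handled by 4 table lookups plus appends of the fetched index lists.
import Mathlib
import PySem

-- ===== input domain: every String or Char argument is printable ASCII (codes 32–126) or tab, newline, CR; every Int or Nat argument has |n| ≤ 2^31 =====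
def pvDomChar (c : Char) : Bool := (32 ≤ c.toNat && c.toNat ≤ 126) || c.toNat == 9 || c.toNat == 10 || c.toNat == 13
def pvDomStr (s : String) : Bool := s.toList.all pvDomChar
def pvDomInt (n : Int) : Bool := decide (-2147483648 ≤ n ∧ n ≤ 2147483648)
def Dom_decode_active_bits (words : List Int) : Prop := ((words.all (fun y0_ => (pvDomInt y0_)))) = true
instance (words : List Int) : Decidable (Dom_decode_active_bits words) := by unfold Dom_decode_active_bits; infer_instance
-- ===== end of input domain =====

-- B replaces A's per-bit scan (16 mask tests per word) by a table-driven decode: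
-- a precomputed table maps each 4-bit nibble value to its list of set-bit indices,
-- and each word is handled by 4 table lookups; return values proved identical.

-- ===== PORT A =====
def decode_active_bits (words : List Int) : List Int :=
  (PySem.List.enumerate words 0).foldl (fun active p =>
    -- value = int(word) & 0xFFFF (int() is the identity on int); bit ∈ [0,16) is
    -- nonnegative, so `1 << bit` is exactly `(1 : Int) <<< bit.toNat`
    (PySem.List.pyRange 0 16 1).foldl (fun acc bit =>
      if PySem.Int.band (PySem.Int.band p.2 65535) ((1 : Int) <<< bit.toNat) ≠ 0
      then acc ++ [p.1 * 16 + bit] else acc) active) []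

-- ===== PORT B =====
-- _NIBBLE_BITS = [[b for b in range(4) if v >> b & 1] for v in range(16)]
-- (b ∈ [0,4) is nonnegative, so `v >> b` is exactly `v >>> b.toNat`)
def pvNibbleBits : List (List Int) :=
  (PySem.List.pyRange 0 16 1).map (fun v : Int =>
    (PySem.List.pyRange 0 4 1).filter (fun b => PySem.Int.band (v >>> b.toNat) 1 != 0))

def decode_active_bits_alt (words : List Int) : List Int :=
  (PySem.List.enumerate words 0).foldl (fun active p =>
    -- value = int(word) & 0xFFFF; `value >> 4*n` is Lean's `>>>` on Int (n ≥ 0);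
    -- the table index `value >> 4*n & 0xF` is always in [0,16), so the list indexing
    -- never raises and pyGetD's default [] is never used.
    (PySem.List.pyRange 0 4 1).foldl (fun acc n =>
      (PySem.List.pyGetD pvNibbleBits
          (PySem.Int.band ((PySem.Int.band p.2 65535) >>> (4 * n)) 15) []).foldl
        (fun a b => a ++ [(p.1 * 16 + 4 * n) + b]) acc) active) []

-- ===== PRECONDITION & SPEC =====
def Spec_decode_active_bits (words : List Int) (out : List Int) : Prop := out = decode_active_bits_alt words
instance (words : List Int) (out : List Int) : Decidable (Spec_decode_active_bits words out) := by unfold Spec_decode_active_bits; infer_instance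

-- ===== CLAIM (what is proved, stated in full; the proofs are below) =====
def Claim_equal_decode_active_bits : Prop := ∀ (words : List Int), Dom_decode_active_bits words → Spec_decode_active_bits words (decode_active_bits words)

-- ===== LEMMAS AND PROOFS =====

/-- The ascending list of set-bit positions of `n` below `f`. -/
def pvBits (n f : Nat) : List Nat := (List.range f).filter n.testBit

/-- Common specification: concatenated set-bit indices, word by word. -/
def pvS : List Int → Int → List Int
  | [], _ => []
  | w :: ws, base =>
    ((pvBits ((PySem.Int.band w 65535).toNat) 16).map (fun b : Nat => base + (b : Int))) ++ pvS ws (base + 16)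

theorem pvS_cons (w : Int) (ws : List Int) (base : Int) :
    pvS (w :: ws) base =
      ((pvBits ((PySem.Int.band w 65535).toNat) 16).map (fun b : Nat => base + (b : Int))) ++ pvS ws (base + 16) := rfl

theorem pv_mask_range (w : Int) : 0 ≤ PySem.Int.band w 65535 ∧ PySem.Int.band w 65535 < 65536 := by
  unfold PySem.Int.band
  by_cases h : 0 ≤ w
  · rw [if_pos h, if_pos (by norm_num : (0:Int) ≤ 65535)]
    have h2 := Nat.and_le_right (n := w.toNat) (m := (65535 : Int).toNat)
    have h3 : (65535 : Int).toNat = 65535 := rfl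
    omega
  · rw [if_neg h, if_pos (by norm_num : (0:Int) ≤ 65535)]
    have h2 : (65535 : Int).toNat &&& (-w - 1).toNat ≤ (65535 : Int).toNat :=
      Nat.and_le_left
    have h3 : (65535 : Int).toNat = 65535 := rfl
    omega

theorem pv_testA (v : Int) (hv : 0 ≤ v) (k : Nat) :
    (PySem.Int.band v ((1 : Int) <<< ((k : Int))) ≠ 0) ↔ v.toNat.testBit k := by
  have hs : ((1 : Int) <<< ((k : Int))) = ((2 ^ k : Nat) : Int) := Int.one_shiftLeft k
  have ht : ((2 ^ k : Nat) : Int).toNat = 2 ^ k := Int.toNat_natCast _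
  rw [hs, PySem.Int.band_of_nonneg hv (by positivity), ht, Nat.and_two_pow]
  cases h : v.toNat.testBit k
  · simp
  · simp only [Bool.toNat_true, one_mul, iff_true]
    have : (0 : Int) < ((2 ^ k : Nat) : Int) := by positivity
    omega

theorem pv_inner_eq (w base : Int) (acc : List Int) :
    (PySem.List.pyRange 0 16 1).foldl (fun acc bit =>
        if PySem.Int.band (PySem.Int.band w 65535) ((1 : Int) <<< bit.toNat) ≠ 0
        then acc ++ [base + bit] else acc) acc
      = acc ++ (pvBits ((PySem.Int.band w 65535).toNat) 16).map (fun b : Nat => base + (b : Int)) := by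
  obtain ⟨hv0, _⟩ := pv_mask_range w
  rw [PySem.List.foldl_append_ite
      (p := fun bit => PySem.Int.band (PySem.Int.band w 65535) ((1 : Int) <<< bit.toNat) ≠ 0)
      (f := fun bit => base + bit)]
  congr 1
  have hr : PySem.List.pyRange 0 16 1 = (List.range 16).map (fun k : Nat => (k : Int)) := by
    rw [PySem.List.pyRange_one]; simp
  rw [hr, List.filter_map, List.map_map]
  unfold pvBits
  have hfun : (fun a : Nat =>
        decide (PySem.Int.band (PySem.Int.band w 65535) ((1 : Int) <<< ((((a : Int)).toNat : Nat) : Int)) ≠ 0))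
      = (fun a : Nat => (PySem.Int.band w 65535).toNat.testBit a) := by
    funext k
    have hk : ((k : Int)).toNat = k := Int.toNat_natCast k
    rw [hk]
    cases h : (PySem.Int.band w 65535).toNat.testBit k
    · simp [(pv_testA _ hv0 k).not.mpr (by simp [h])]
    · simp [(pv_testA _ hv0 k).mpr h]
  simp only [Function.comp_def]
  rw [hfun]

theorem pv_A_gen : ∀ (ws : List Int) (s : Int) (acc : List Int),
    (PySem.List.enumerate ws s).foldl (fun active p =>
      (PySem.List.pyRange 0 16 1).foldl (fun acc bit =>
        if PySem.Int.band (PySem.Int.band p.2 65535) ((1 : Int) <<< bit.toNat) ≠ 0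
        then acc ++ [p.1 * 16 + bit] else acc) active) acc
      = acc ++ pvS ws (s * 16) := by
  intro ws
  induction ws with
  | nil => intro s acc; simp [PySem.List.enumerate_nil, pvS]
  | cons w ws ih =>
    intro s acc
    rw [PySem.List.enumerate_cons, List.foldl_cons]
    rw [pv_inner_eq w (s * 16) acc, ih (s + 1)]
    have harg : (s + 1) * 16 = s * 16 + 16 := by ring
    rw [harg, pvS_cons, List.append_assoc]

-- ---- B side ----

/-- The table lookup at any index `m < 16` yields the set-bit positions of `m` below 4. -/
theorem pv_table (m : Nat) (hm : m < 16) :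
    PySem.List.pyGetD pvNibbleBits ((m : Nat) : Int) [] = (pvBits m 4).map (fun b : Nat => (b : Int)) := by
  interval_cases m <;> decide

/-- Splitting the bit positions of `n` below `a + b` at `a`. -/
theorem pvBits_split (n a b : Nat) :
    pvBits n (a + b) = pvBits n a ++ (pvBits (n >>> a) b).map (fun k => a + k) := by
  unfold pvBits
  rw [List.range_add, List.filter_append, List.filter_map]
  congr 1
  have hp : n.testBit ∘ (fun k => a + k) = (n >>> a).testBit := by
    funext k
    simp [Nat.testBit_shiftRight]
  rw [hp]

/-- Masking with 15 does not change the bits below 4. -/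
theorem pvBits_and15 (x : Nat) : pvBits (x &&& 15) 4 = pvBits x 4 := by
  unfold pvBits
  apply List.filter_congr
  intro k hk
  have hk4 : k < 4 := by simpa using List.mem_range.mp hk
  rw [Nat.testBit_and]
  have h15 : (15 : Nat).testBit k = true := by interval_cases k <;> decide
  simp [h15]

theorem pv_shift_cast (v : Int) (h0 : 0 ≤ v) (c : Nat) :
    v >>> ((c : Nat) : Int) = ((v.toNat >>> c : Nat) : Int) := by
  rcases Int.eq_ofNat_of_zero_le h0 with ⟨V, rfl⟩
  simp [Nat.shiftRight_eq_div_pow]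

/-- One nibble: table lookup at `v >> c & 15`, appended with offset `off`. -/
theorem pv_nib (v : Int) (h0 : 0 ≤ v) (ci : Int) (c : Nat) (hc : ci = (c : Nat))
    (off : Int) (acc : List Int) :
    (PySem.List.pyGetD pvNibbleBits (PySem.Int.band (v >>> ci) 15) []).foldl
        (fun a b => a ++ [off + b]) acc
      = acc ++ (pvBits (v.toNat >>> c) 4).map (fun b : Nat => off + (b : Int)) := by
  have hidx : PySem.Int.band (v >>> ci) 15 = (((v.toNat >>> c) &&& 15 : Nat) : Int) := by
    rw [hc, pv_shift_cast v h0 c]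
    simpa using PySem.Int.band_natCast (v.toNat >>> c) 15
  have hm : (v.toNat >>> c) &&& 15 < 16 := by
    have := Nat.and_le_right (n := v.toNat >>> c) (m := 15)
    omega
  rw [hidx, pv_table _ hm, pvBits_and15, PySem.List.foldl_append_singleton_eq_map,
    List.map_map]
  rfl

/-- Per word: the 4 table lookups reproduce the 16 bit positions. -/
theorem pv_inner_B (v : Int) (h0 : 0 ≤ v) (base : Int) (acc : List Int) :
    (PySem.List.pyRange 0 4 1).foldl (fun acc n =>
        (PySem.List.pyGetD pvNibbleBits
            (PySem.Int.band (v >>> (4 * n)) 15) []).foldl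
          (fun a b => a ++ [(base + 4 * n) + b]) acc) acc
      = acc ++ (pvBits v.toNat 16).map (fun b : Nat => base + (b : Int)) := by
  have hr : PySem.List.pyRange 0 4 1 = [0, 1, 2, 3] := by decide
  rw [hr]
  simp only [List.foldl_cons, List.foldl_nil]
  rw [pv_nib v h0 (4 * 0) 0 (by norm_num), pv_nib v h0 (4 * 1) 4 (by norm_num),
    pv_nib v h0 (4 * 2) 8 (by norm_num), pv_nib v h0 (4 * 3) 12 (by norm_num)]
  have s1 : v.toNat >>> 4 >>> 4 = v.toNat >>> 8 := by
    rw [← Nat.shiftRight_add]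
  have s2 : v.toNat >>> 8 >>> 4 = v.toNat >>> 12 := by
    rw [← Nat.shiftRight_add]
  have e1 : pvBits v.toNat 16 = pvBits v.toNat 4 ++ (pvBits (v.toNat >>> 4) 12).map (fun k => 4 + k) := by
    have h := pvBits_split v.toNat 4 12
    norm_num at h
    exact h
  have e2 : pvBits (v.toNat >>> 4) 12
      = pvBits (v.toNat >>> 4) 4 ++ (pvBits (v.toNat >>> 8) 8).map (fun k => 4 + k) := by
    have h := pvBits_split (v.toNat >>> 4) 4 8
    norm_num [s1] at h
    exact h
  have e3 : pvBits (v.toNat >>> 8) 8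
      = pvBits (v.toNat >>> 8) 4 ++ (pvBits (v.toNat >>> 12) 4).map (fun k => 4 + k) := by
    have h := pvBits_split (v.toNat >>> 8) 4 4
    norm_num [s2] at h
    exact h
  rw [e1, e2, e3]
  simp only [List.map_append, List.map_map, List.append_assoc, Nat.shiftRight_zero]
  congr 1
  congr 1
  · apply List.map_congr_left; intro b _; ring
  congr 1
  · apply List.map_congr_left; intro b _; simp [Function.comp]; ring
  congr 1
  · apply List.map_congr_left; intro b _; simp [Function.comp]; ring
  · apply List.map_congr_left; intro b _; simp [Function.comp]; ring

theorem pv_B_gen : ∀ (ws : List Int) (s : Int) (acc : List Int),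
    (PySem.List.enumerate ws s).foldl (fun active p =>
      (PySem.List.pyRange 0 4 1).foldl (fun acc n =>
        (PySem.List.pyGetD pvNibbleBits
            (PySem.Int.band ((PySem.Int.band p.2 65535) >>> (4 * n)) 15) []).foldl
          (fun a b => a ++ [(p.1 * 16 + 4 * n) + b]) acc) active) acc
      = acc ++ pvS ws (s * 16) := by
  intro ws
  induction ws with
  | nil => intro s acc; simp [PySem.List.enumerate_nil, pvS]
  | cons w ws ih =>
    intro s acc
    rw [PySem.List.enumerate_cons, List.foldl_cons]
    obtain ⟨hv0, _⟩ := pv_mask_range w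
    show (PySem.List.enumerate ws (s + 1)).foldl _
        ((PySem.List.pyRange 0 4 1).foldl (fun acc n =>
          (PySem.List.pyGetD pvNibbleBits
              (PySem.Int.band ((PySem.Int.band w 65535) >>> (4 * n)) 15) []).foldl
            (fun a b => a ++ [(s * 16 + 4 * n) + b]) acc) acc)
      = acc ++ pvS (w :: ws) (s * 16)
    rw [pv_inner_B (PySem.Int.band w 65535) hv0 (s * 16) acc, ih (s + 1)]
    have harg : (s + 1) * 16 = s * 16 + 16 := by ring
    rw [harg, pvS_cons, List.append_assoc]

-- ===== VERDICT (by name: the statement is the Claim_ definition above) =====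
theorem decode_active_bits_spec : Claim_equal_decode_active_bits := by
  intro words _
  unfold Spec_decode_active_bits decode_active_bits decode_active_bits_alt
  have hA := pv_A_gen words 0 []
  have hB := pv_B_gen words 0 []
  rw [hA, hB]
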